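-- pv_equiv track=rewrite | github.com/petcu1004/Hana_Algorithm_Study | 민새미/[08.18] 기능개발.py | solution
-- ===== SOURCE A (Python) =====
-- def solution(progresses, speeds):
--     answer = []
--     arr = []
--     for i in range(len(progresses)):
--         k = 100 - progresses[i]
--         if k % speeds[i] == 0:
--             arr.append(int(k / speeds[i]))
--         else:
--             arr.append(int(k / speeds[i]) + 1)
--
--     a = arr[0]
--     cnt = 1
--     for i in range(1, len(arr)):
--         if a >= arr[i]:
--             cnt += 1
--         else:
--             answer.append(cnt)
--             cnt = 1
--             a = arr[i]  # 이 부분이 빠져서 틀렸었음..!!!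
--     answer.append(cnt)
--
--     return answer
-- ===== SOURCE B (Python) =====
-- def solution(progresses, speeds):
--     days = [int((100 - p) / s) + (1 if (100 - p) % s else 0)
--             for p, s in zip(progresses, speeds)]
--     pm = [max(days[:i + 1]) for i in range(len(days))]
--     return [pm.count(v) for v in sorted(set(pm))]
-- ===== Notes on version B (the rewrite author's own statement) =====
-- stated objective: alternative
-- what changed: Replaces A's stateful leader/counter scan by a table-then-histogram algorithm: build the per-index prefix-maximum table by brute force, then return the count of each distinct prefix-max value in ascending order (the running leader is exactly the prefix maximum, and leaders appear in increasing order).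
import Mathlib
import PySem

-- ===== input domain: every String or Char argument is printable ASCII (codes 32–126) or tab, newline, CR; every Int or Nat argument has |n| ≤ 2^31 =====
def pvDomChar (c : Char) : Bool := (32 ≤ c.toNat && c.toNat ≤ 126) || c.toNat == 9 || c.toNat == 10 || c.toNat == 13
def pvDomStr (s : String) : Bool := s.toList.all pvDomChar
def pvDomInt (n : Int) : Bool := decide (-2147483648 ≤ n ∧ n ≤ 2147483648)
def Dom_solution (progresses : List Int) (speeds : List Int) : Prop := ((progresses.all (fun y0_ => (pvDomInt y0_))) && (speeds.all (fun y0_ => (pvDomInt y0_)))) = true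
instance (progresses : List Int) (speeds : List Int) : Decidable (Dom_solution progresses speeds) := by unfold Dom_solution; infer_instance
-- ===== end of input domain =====

-- B replaces A's stateful leader/counter scan by a table-then-histogram algorithm (brute-force
-- prefix-maximum table, then count each distinct prefix-max value in ascending order); same
-- result, quadratic instead of linear ("alternative").
-- int(k / s) is ported as PySem.Int.truncdiv, exact for |k|, |s| < 2^53 (Dom_solution gives |·| ≤ 2^31).

-- ===== PORT A =====
def solution (progresses : List Int) (speeds : List Int) : List Int :=
  -- first loop: arr of deploy days; Python's k = 100 - progresses[i] and speeds[i] are inlined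
  let arr := (PySem.List.pyRange 0 (progresses.length : Int) 1).foldl
    (fun (arr : List Int) i =>
      if PySem.Int.mod (100 - PySem.List.pyGetD progresses i 0) (PySem.List.pyGetD speeds i 0) = 0
      then arr ++ [PySem.Int.truncdiv (100 - PySem.List.pyGetD progresses i 0) (PySem.List.pyGetD speeds i 0)]
      else arr ++ [PySem.Int.truncdiv (100 - PySem.List.pyGetD progresses i 0) (PySem.List.pyGetD speeds i 0) + 1]) []
  let a := PySem.List.pyGetD arr 0 0   -- arr[0] (the IndexError on empty input is excluded by Pre_)
  -- second loop over range(1, len(arr)): state (answer, a, cnt)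
  let st := (PySem.List.pyRange 1 (arr.length : Int) 1).foldl
    (fun (st : List Int × Int × Int) i =>
      if st.2.1 ≥ PySem.List.pyGetD arr i 0 then (st.1, st.2.1, st.2.2 + 1)
      else (st.1 ++ [st.2.2], PySem.List.pyGetD arr i 0, 1)) ([], a, 1)
  st.1 ++ [st.2.2]

-- ===== PORT B =====
-- per-feature deploy day, as computed in Source B's comprehension
def pvDay (p s : Int) : Int :=
  PySem.Int.truncdiv (100 - p) s + (if PySem.Int.mod (100 - p) s ≠ 0 then 1 else 0)

def solution_alt (progresses : List Int) (speeds : List Int) : List Int :=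
  let days := List.zipWith pvDay progresses speeds
  -- pm = [max(days[:i + 1]) for i in range(len(days))]; the slice is nonempty for every i in
  -- range, so Python's max never raises and max?'s default 0 is unreachable
  let pm := (PySem.List.pyRange 0 (days.length : Int) 1).map
      (fun i => (PySem.List.max? (PySem.List.slice days none (some (i + 1))) (fun x => x)).getD 0)
  -- [pm.count(v) for v in sorted(set(pm))]
  (PySem.List.sorted (PySem.Set.ofList pm) (fun x => x) false).map
      (fun v => (PySem.List.count pm v : Int))

-- ===== PRECONDITION & SPEC =====
-- Pre_ excludes exactly the inputs on which A raises: empty progresses (IndexError at arr[0]),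
-- speeds shorter than progresses (IndexError), or a zero speed in range (ZeroDivisionError).
def Pre_solution (progresses : List Int) (speeds : List Int) : Prop :=
  progresses ≠ [] ∧ progresses.length ≤ speeds.length ∧
    ∀ x ∈ speeds.take progresses.length, x ≠ 0
instance (progresses : List Int) (speeds : List Int) : Decidable (Pre_solution progresses speeds) := by unfold Pre_solution; infer_instance
def pvWitness_solution : List Int × List Int := ([93, 30, 55], [1, 30, 5])
def Spec_solution (progresses : List Int) (speeds : List Int) (out : List Int) : Prop := out = solution_alt progresses speeds
instance (progresses : List Int) (speeds : List Int) (out : List Int) : Decidable (Spec_solution progresses speeds out) := by unfold Spec_solution; infer_instance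

-- ===== CLAIM (what is proved, stated in full; the proofs are below) =====
def Claim_equal_solution : Prop := ∀ (progresses : List Int) (speeds : List Int), Dom_solution progresses speeds → Pre_solution progresses speeds → Spec_solution progresses speeds (solution progresses speeds)

-- ===== LEMMAS AND PROOFS =====

-- the common specification both programs meet: block decomposition of the day list
def pvGroups : List Int → List Int
  | [] => []
  | d :: ds =>
    (((ds.takeWhile (fun x => decide (x ≤ d))).length : Int) + 1) ::
      pvGroups (ds.dropWhile (fun x => decide (x ≤ d)))
termination_by l => l.length
decreasing_by
  simp only [List.length_cons]
  exact Nat.lt_succ_of_le (List.length_dropWhile_le _ _)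

-- A's second loop as a structural recursion over the tail of arr
def pvLoopA (a cnt : Int) : List Int → List Int
  | [] => [cnt]
  | x :: xs => if a ≥ x then pvLoopA a (cnt + 1) xs else cnt :: pvLoopA x 1 xs

-- prefix-maximum scan (running max m)
def pvScan (m : Int) : List Int → List Int
  | [] => []
  | x :: xs => max m x :: pvScan (max m x) xs

def pvPM : List Int → List Int
  | [] => []
  | d :: ds => d :: pvScan d ds

theorem pvGroups_nil : pvGroups [] = [] := by rw [pvGroups.eq_def]

theorem pvGroups_cons (d : Int) (ds : List Int) :
    pvGroups (d :: ds) =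
      (((ds.takeWhile (fun x => decide (x ≤ d))).length : Int) + 1) ::
        pvGroups (ds.dropWhile (fun x => decide (x ≤ d))) := by
  rw [pvGroups.eq_def]

-- ---------- A-side ----------

-- A's first loop builds the zipWith of pvDay
theorem buildA_eq_zipWith (p s : List Int) (h : p.length ≤ s.length) :
    (PySem.List.pyRange 0 (p.length : Int) 1).foldl
      (fun (arr : List Int) i =>
        if PySem.Int.mod (100 - PySem.List.pyGetD p i 0) (PySem.List.pyGetD s i 0) = 0
        then arr ++ [PySem.Int.truncdiv (100 - PySem.List.pyGetD p i 0) (PySem.List.pyGetD s i 0)]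
        else arr ++ [PySem.Int.truncdiv (100 - PySem.List.pyGetD p i 0) (PySem.List.pyGetD s i 0) + 1]) []
    = List.zipWith pvDay p s := by
  have hbody : (fun (arr : List Int) i =>
        if PySem.Int.mod (100 - PySem.List.pyGetD p i 0) (PySem.List.pyGetD s i 0) = 0
        then arr ++ [PySem.Int.truncdiv (100 - PySem.List.pyGetD p i 0) (PySem.List.pyGetD s i 0)]
        else arr ++ [PySem.Int.truncdiv (100 - PySem.List.pyGetD p i 0) (PySem.List.pyGetD s i 0) + 1])
      = (fun (arr : List Int) i =>
        arr ++ [pvDay (PySem.List.pyGetD p i 0) (PySem.List.pyGetD s i 0)]) := by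
    funext arr i
    unfold pvDay
    split_ifs <;> simp_all
  rw [hbody, PySem.List.foldl_append_singleton_eq_map]
  apply List.ext_getElem
  · simp [PySem.List.length_pyRange_one, Nat.min_eq_left h]
  · intro k hk1 hk2
    have hkp : k < p.length := by
      simpa [PySem.List.length_pyRange_one] using hk1
    have hks : k < s.length := lt_of_lt_of_le hkp h
    simp [PySem.List.getElem_pyRange_one, PySem.List.pyGetD_natCast,
      List.getD_eq_getElem?_getD, hkp, hks]

-- A's second fold = pvLoopA
theorem foldA_eq_loopA (xs : List Int) (ans : List Int) (a cnt : Int) :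
    (xs.foldl (fun (st : List Int × Int × Int) x =>
        if st.2.1 ≥ x then (st.1, st.2.1, st.2.2 + 1)
        else (st.1 ++ [st.2.2], x, 1)) (ans, a, cnt)).1
      ++ [(xs.foldl (fun (st : List Int × Int × Int) x =>
        if st.2.1 ≥ x then (st.1, st.2.1, st.2.2 + 1)
        else (st.1 ++ [st.2.2], x, 1)) (ans, a, cnt)).2.2]
    = ans ++ pvLoopA a cnt xs := by
  induction xs generalizing ans a cnt with
  | nil => simp [pvLoopA]
  | cons x xs ih =>
    simp only [List.foldl_cons, pvLoopA]
    by_cases h : a ≥ x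
    · simp only [if_pos h]
      rw [ih]
    · simp only [if_neg h]
      rw [ih, List.append_assoc]
      rfl

-- the leader scan is the block decomposition
theorem loopA_eq_groups (ds : List Int) (a cnt : Int) :
    pvLoopA a cnt ds =
      (cnt + ((ds.takeWhile (fun x => decide (x ≤ a))).length : Int)) ::
        pvGroups (ds.dropWhile (fun x => decide (x ≤ a))) := by
  induction ds generalizing a cnt with
  | nil => simp [pvLoopA, pvGroups_nil]
  | cons x xs ih =>
    simp only [pvLoopA]
    by_cases h : a ≥ x
    · rw [if_pos h]
      rw [ih a (cnt + 1)]
      have hx : decide (x ≤ a) = true := by simpa using h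
      simp [hx]
      ring
    · rw [if_neg h]
      have hx : ¬ (x ≤ a) := by omega
      rw [ih x 1]
      simp [hx, pvGroups_cons, add_comm]

-- ---------- B-side: port bridge to pvPM ----------

theorem scan_length (xs : List Int) (m : Int) : (pvScan m xs).length = xs.length := by
  induction xs generalizing m with
  | nil => simp [pvScan]
  | cons x xs ih => simp [pvScan, ih]

theorem scan_getElem (xs : List Int) (m : Int) (j : Nat) (h : j < xs.length) :
    (pvScan m xs)[j]'(by rw [scan_length]; exact h) = (xs.take (j + 1)).foldl max m := by
  induction xs generalizing m j with
  | nil => simp at h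
  | cons x xs ih =>
    cases j with
    | zero => simp [pvScan]
    | succ j =>
      have hj : j < xs.length := by simpa using h
      simp only [pvScan, List.getElem_cons_succ, List.take_succ_cons, List.foldl_cons]
      exact ih (max m x) j hj

theorem pm_port_eq (l : List Int) :
    (PySem.List.pyRange 0 (l.length : Int) 1).map
      (fun i => (PySem.List.max? (PySem.List.slice l none (some (i + 1))) (fun x => x)).getD 0)
    = pvPM l := by
  cases l with
  | nil => simp [pvPM]
  | cons d ds =>
    apply List.ext_getElem
    · simp [PySem.List.length_pyRange_one, pvPM, scan_length]
    · intro k hk1 hk2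
      have hk : k < ds.length + 1 := by
        simpa [PySem.List.length_pyRange_one] using hk1
      rw [List.getElem_map, PySem.List.getElem_pyRange_one]
      have hcast : (0 : Int) + (k : Int) + 1 = ((k + 1 : Nat) : Int) := by push_cast; ring
      rw [hcast, PySem.List.slice_to_natCast]
      have htake : (d :: ds).take (k + 1) = d :: ds.take k := by
        simp [List.take_succ_cons]
      rw [htake, PySem.List.max?_id_cons]
      simp only [Option.getD_some]
      cases k with
      | zero => simp [pvPM]
      | succ j =>
        have hj : j < ds.length := by omega
        show (ds.take (j + 1)).foldl max d = (pvPM (d :: ds))[j + 1]'_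
        simp only [pvPM, List.getElem_cons_succ]
        exact (scan_getElem ds d j hj).symm

-- ---------- B-side: order facts ----------

theorem scan_le (xs : List Int) (m : Int) : ∀ y ∈ pvScan m xs, m ≤ y := by
  induction xs generalizing m with
  | nil => simp [pvScan]
  | cons x xs ih =>
    intro y hy
    simp only [pvScan, List.mem_cons] at hy
    rcases hy with rfl | hy
    · exact le_max_left _ _
    · exact le_trans (le_max_left _ _) (ih (max m x) y hy)

theorem scan_pairwise (xs : List Int) (m : Int) :
    (pvScan m xs).Pairwise (· ≤ ·) := by
  induction xs generalizing m with
  | nil => simp [pvScan]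
  | cons x xs ih =>
    simp only [pvScan, List.pairwise_cons]
    exact ⟨scan_le xs (max m x), ih (max m x)⟩

theorem pvPM_pairwise (l : List Int) : (pvPM l).Pairwise (· ≤ ·) := by
  cases l with
  | nil => simp [pvPM]
  | cons d ds =>
    simp only [pvPM, List.pairwise_cons]
    exact ⟨scan_le ds d, scan_pairwise ds d⟩

theorem pairwise_lt_ofList (l : List Int) (h : l.Pairwise (· ≤ ·)) :
    (PySem.Set.ofList l).Pairwise (· < ·) := by
  induction l with
  | nil => simp [PySem.Set.ofList_nil]
  | cons x xs ih =>
    rcases List.pairwise_cons.mp h with ⟨hx, hxs⟩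
    rw [PySem.Set.ofList_cons]
    refine List.pairwise_cons.mpr ⟨?_, ?_⟩
    · intro y hy
      rcases (PySem.Set.mem_discard _ _ _).mp hy with ⟨hmem, hne⟩
      have : x ≤ y := hx y ((PySem.Set.mem_ofList _ _).mp hmem)
      exact lt_of_le_of_ne this (Ne.symm hne)
    · -- discard is a sublist of the set, so strict sortedness is preserved
      have hsub : List.Sublist (PySem.Set.discard (PySem.Set.ofList xs) x) (PySem.Set.ofList xs) := by
        simp only [PySem.Set.discard]
        exact List.filter_sublist
      exact List.Pairwise.sublist hsub (ih hxs)

theorem sorted_ofList_eq (l : List Int) (h : l.Pairwise (· ≤ ·)) :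
    PySem.List.sorted (PySem.Set.ofList l) (fun x => x) false = PySem.Set.ofList l :=
  PySem.List.sorted_eq_of_perm_of_pairwise_lt _ _ _ (List.Perm.refl _) (pairwise_lt_ofList l h)

-- ---------- B-side: block decomposition of pvPM ----------

theorem scan_append (xs ys : List Int) (m : Int) :
    pvScan m (xs ++ ys) = pvScan m xs ++ pvScan (xs.foldl max m) ys := by
  induction xs generalizing m with
  | nil => simp [pvScan]
  | cons x xs ih => simp [pvScan, ih]

theorem scan_const (xs : List Int) (m : Int) (h : ∀ x ∈ xs, x ≤ m) :
    pvScan m xs = List.replicate xs.length m := by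
  induction xs with
  | nil => simp [pvScan]
  | cons x xs ih =>
    have hx : max m x = m := max_eq_left (h x (by simp))
    simp only [pvScan, hx, List.length_cons, List.replicate_succ]
    rw [ih (fun y hy => h y (by simp [hy]))]

theorem foldl_max_const (xs : List Int) (m : Int) (h : ∀ x ∈ xs, x ≤ m) :
    xs.foldl max m = m := by
  induction xs with
  | nil => rfl
  | cons x xs ih =>
    have hx : max m x = m := max_eq_left (h x (by simp))
    simp only [List.foldl_cons, hx]
    exact ih (fun y hy => h y (by simp [hy]))

theorem pvPM_block (d : Int) (ds : List Int) :
    pvPM (d :: ds) =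
      List.replicate ((ds.takeWhile (fun x => decide (x ≤ d))).length + 1) d ++
        pvPM (ds.dropWhile (fun x => decide (x ≤ d))) := by
  have hsplit := List.takeWhile_append_dropWhile (p := fun x => decide (x ≤ d)) (l := ds)
  have hle : ∀ x ∈ ds.takeWhile (fun x => decide (x ≤ d)), x ≤ d := by
    intro x hx
    simpa using List.mem_takeWhile_imp hx
  calc pvPM (d :: ds) = d :: pvScan d ds := rfl
    _ = d :: pvScan d (ds.takeWhile (fun x => decide (x ≤ d)) ++
          ds.dropWhile (fun x => decide (x ≤ d))) := by rw [hsplit]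
    _ = d :: (List.replicate (ds.takeWhile (fun x => decide (x ≤ d))).length d ++
          pvScan d (ds.dropWhile (fun x => decide (x ≤ d)))) := by
          rw [scan_append, scan_const _ _ hle, foldl_max_const _ _ hle]
    _ = _ := by
          rw [List.replicate_succ]
          cases hdw : ds.dropWhile (fun x => decide (x ≤ d)) with
          | nil => simp [pvScan, pvPM]
          | cons r0 r' =>
            have hr0 : ¬ (r0 ≤ d) := by
              have := List.head_dropWhile_not (p := fun x => decide (x ≤ d)) (l := ds)
                (by rw [hdw]; simp)
              simpa [hdw] using this
            have hmax : max d r0 = r0 := max_eq_right (by omega)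
            simp [pvScan, pvPM, hmax]

theorem pvPM_head_le (x : Int) (xs : List Int) : ∀ y ∈ pvPM (x :: xs), x ≤ y := by
  intro y hy
  simp only [pvPM, List.mem_cons] at hy
  rcases hy with rfl | hy
  · exact le_refl _
  · exact scan_le xs x y hy

-- ---------- set/count arithmetic ----------

theorem foldl_add_replicate (k : Nat) (d : Int) (s : List Int) (h : d ∈ s) :
    (List.replicate k d).foldl PySem.Set.add s = s := by
  induction k with
  | zero => rfl
  | succ k ih =>
    simp only [List.replicate_succ, List.foldl_cons, PySem.Set.add_of_mem h]
    exact ih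

theorem ofList_replicate_append (k : Nat) (d : Int) (rest : List Int)
    (h : ∀ y ∈ rest, y ≠ d) :
    PySem.Set.ofList (List.replicate (k + 1) d ++ rest) = d :: PySem.Set.ofList rest := by
  rw [PySem.Set.ofList_append]
  have h1 : PySem.Set.ofList (List.replicate (k + 1) d) = [d] := by
    rw [PySem.Set.ofList_eq_foldl]
    simp only [List.replicate_succ, List.foldl_cons]
    rw [PySem.Set.add_of_not_mem (by simp)]
    exact foldl_add_replicate k d ([] ++ [d]) (by simp)
  rw [h1, PySem.Set.update_eq_append_filter]
  have h2 : (PySem.Set.ofList rest).filter (fun y => !(PySem.Set.contains [d] y)) =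
      PySem.Set.ofList rest := by
    apply List.filter_eq_self.mpr
    intro y hy
    have : y ≠ d := h y ((PySem.Set.mem_ofList _ _).mp hy)
    simp [PySem.Set.contains_eq_listContains, List.contains_eq_mem, this]
  rw [h2]
  rfl

-- ---------- main B-side theorem: histogram of prefix maxima = blocks ----------

theorem histo_eq_groups (l : List Int) :
    (PySem.List.sorted (PySem.Set.ofList (pvPM l)) (fun x => x) false).map
      (fun v => ((pvPM l).count v : Int)) = pvGroups l := by
  induction l using pvGroups.induct with
  | case1 => simp [pvPM, pvGroups_nil, PySem.Set.ofList_nil, PySem.List.sorted]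
  | case2 d ds ih =>
    rw [sorted_ofList_eq _ (pvPM_pairwise (d :: ds))] at *
    rw [sorted_ofList_eq _ (pvPM_pairwise (ds.dropWhile (fun x => decide (x ≤ d))))] at ih
    have hgt : ∀ y ∈ pvPM (ds.dropWhile (fun x => decide (x ≤ d))), d < y := by
      intro y hy
      cases hdw : ds.dropWhile (fun x => decide (x ≤ d)) with
      | nil =>
        rw [hdw] at hy
        simp [pvPM] at hy
      | cons r0 r' =>
        rw [hdw] at hy
        have hr0 : ¬ (r0 ≤ d) := by
          have := List.head_dropWhile_not (p := fun x => decide (x ≤ d)) (l := ds)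
            (by rw [hdw]; simp)
          simpa [hdw] using this
        have := pvPM_head_le r0 r' y hy
        omega
    have hne : ∀ y ∈ pvPM (ds.dropWhile (fun x => decide (x ≤ d))), y ≠ d := by
      intro y hy
      have := hgt y hy
      omega
    rw [pvPM_block d ds, ofList_replicate_append _ _ _ hne]
    rw [List.map_cons]
    have hcount_d : (List.replicate ((ds.takeWhile (fun x => decide (x ≤ d))).length + 1) d ++
        pvPM (ds.dropWhile (fun x => decide (x ≤ d)))).count d =
        (ds.takeWhile (fun x => decide (x ≤ d))).length + 1 := by
      rw [List.count_append, List.count_replicate_self]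
      have : d ∉ pvPM (ds.dropWhile (fun x => decide (x ≤ d))) := by
        intro hmem
        exact (hne d hmem) rfl
      rw [List.count_eq_zero.mpr this]
    have htail : (PySem.Set.ofList (pvPM (ds.dropWhile (fun x => decide (x ≤ d))))).map
        (fun v => ((List.replicate ((ds.takeWhile (fun x => decide (x ≤ d))).length + 1) d ++
          pvPM (ds.dropWhile (fun x => decide (x ≤ d)))).count v : Int)) =
        (PySem.Set.ofList (pvPM (ds.dropWhile (fun x => decide (x ≤ d))))).map
        (fun v => ((pvPM (ds.dropWhile (fun x => decide (x ≤ d)))).count v : Int)) := by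
      apply List.map_congr_left
      intro v hv
      have hvne : v ≠ d := hne v ((PySem.Set.mem_ofList _ _).mp hv)
      rw [List.count_append, List.count_replicate]
      have hdv : ¬ (d = v) := fun hh => hvne hh.symm
      simp [hdv]
    rw [hcount_d, htail, ih]
    rw [pvGroups_cons]
    congr 1

-- B equals the block decomposition, unconditionally
theorem alt_eq_groups (p s : List Int) :
    solution_alt p s = pvGroups (List.zipWith pvDay p s) := by
  unfold solution_alt
  simp only []
  rw [pm_port_eq]
  have hcnt : (fun v => (PySem.List.count (pvPM (List.zipWith pvDay p s)) v : Int)) =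
      (fun v => (((pvPM (List.zipWith pvDay p s)).count v : Nat) : Int)) := by
    funext v
    rw [PySem.List.count_eq]
  rw [hcnt]
  exact histo_eq_groups (List.zipWith pvDay p s)

-- ===== VERDICT (by name: the statement is the Claim_ definition above) =====
theorem solution_spec : Claim_equal_solution := by
  intro p s hdom hpre
  obtain ⟨hne, hlen, hz⟩ := hpre
  unfold Spec_solution solution
  simp only []
  rw [buildA_eq_zipWith p s hlen, alt_eq_groups]
  have hdne : (List.zipWith pvDay p s) ≠ [] := by
    cases p with
    | nil => exact absurd rfl hne
    | cons ph pt =>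
      cases s with
      | nil => simp at hlen
      | cons sh st => simp [List.zipWith]
  obtain ⟨d0, ds, hdays⟩ := List.exists_cons_of_ne_nil hdne
  rw [hdays]
  rw [PySem.List.foldl_pyRange_pyGetD' (d0 :: ds) 0
      (fun (st : List Int × Int × Int) x =>
        if st.2.1 ≥ x then (st.1, st.2.1, st.2.2 + 1)
        else (st.1 ++ [st.2.2], x, 1)) ([], PySem.List.pyGetD (d0 :: ds) 0 0, 1)
      (by norm_num : (0:Int) ≤ 1)]
  simp only [Int.toNat_one, List.drop_succ_cons, List.drop_zero]
  rw [PySem.List.pyGetD_zero_cons]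
  rw [foldA_eq_loopA]
  rw [loopA_eq_groups]
  rw [pvGroups_cons]
  simp only [List.nil_append]
  congr 1
  ring
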